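-- pv_equiv track=rewrite | github.com/databricks-solutions/caspers-kitchens | apps/ceo-dashboard/app/main.py | _detect_routing
-- ===== SOURCE A (Python) =====
-- _ROUTING_SIGNALS: list[tuple[str, list[str]]] = [
--     ("⚖️ Legal Complaints",  ["case no", "ck-", "risk level", "amount at stake", "legal counsel", "litigation", "plaintiff", "settlement amount"]),
--     ("📋 Regulatory",        ["permit no", "certificate no", "expiry date", "issuing authority", "fda registration", "zoning permit", "conditional status"]),
--     ("🔍 Audit Findings",    ["audit report", "auditor", "pwc", "deloitte", "kpmg", "critical finding", "significant finding", "remediation deadline"]),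
--     ("💼 Consultancy",       ["consulting firm", "roi estimate", "mckinsey", "phase 1", "phase 2", "strategic recommendation", "projected saving"]),
--     ("🛡️ Inspections",       ["inspection report", "corrective action", "inspector", "food safety score", "inspection grade", "health permit"]),
--     ("📊 Revenue Analytics", ["cancellation rate", "avg order value", "orders placed", "total orders", "weekly revenue", "order count"]),
--     ("⚙️ Operations",        ["complaint rate", "cancel rate", "food safety grade", "kitchen throughput", "busiest hour", "operational risk"]),
-- ]
--
-- def _detect_routing(text: str) -> str:
--     """Detect which sub-agent(s) handled a response from vocabulary signals in the text."""
--     lower = text.lower()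
--     scored = sorted(
--         [(label, sum(1 for s in sigs if s in lower)) for label, sigs in _ROUTING_SIGNALS],
--         key=lambda x: -x[1],
--     )
--     hits = [(label, score) for label, score in scored if score >= 1]
--     if not hits:
--         return ""
--     # Three or more agents with meaningful signal → multi-agent synthesis
--     if len(hits) >= 3 and hits[2][1] >= 2:
--         return "🏗️ Multi-agent synthesis"
--     return hits[0][0]
-- ===== SOURCE B (Python) =====
-- _ROUTING_SIGNALS: list[tuple[str, list[str]]] = [
--     ("⚖️ Legal Complaints",  ["case no", "ck-", "risk level", "amount at stake", "legal counsel", "litigation", "plaintiff", "settlement amount"]),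
--     ("📋 Regulatory",        ["permit no", "certificate no", "expiry date", "issuing authority", "fda registration", "zoning permit", "conditional status"]),
--     ("🔍 Audit Findings",    ["audit report", "auditor", "pwc", "deloitte", "kpmg", "critical finding", "significant finding", "remediation deadline"]),
--     ("💼 Consultancy",       ["consulting firm", "roi estimate", "mckinsey", "phase 1", "phase 2", "strategic recommendation", "projected saving"]),
--     ("🛡️ Inspections",       ["inspection report", "corrective action", "inspector", "food safety score", "inspection grade", "health permit"]),
--     ("📊 Revenue Analytics", ["cancellation rate", "avg order value", "orders placed", "total orders", "weekly revenue", "order count"]),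
--     ("⚙️ Operations",        ["complaint rate", "cancel rate", "food safety grade", "kitchen throughput", "busiest hour", "operational risk"]),
-- ]
--
--
-- def _sig_score(hay: str, needles: list[str]) -> int:
--     return len([s for s in needles if s in hay])
--
--
-- def _route(hay, signals, best_label, best_score, strong):
--     """Recurse over the signal table, tracking the first best-scoring label and
--     how many labels have strong (>=2) signal; no sorting anywhere."""
--     if not signals:
--         if best_score < 1:
--             return ""
--         if strong >= 3:
--             return "🏗️ Multi-agent synthesis"
--         return best_label
--     (label, sigs), rest = signals[0], signals[1:]
--     sc = _sig_score(hay, sigs)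
--     if best_score < sc:
--         best_label, best_score = label, sc
--     return _route(hay, rest, best_label, best_score, strong + 1 if sc >= 2 else strong)
--
--
-- def _detect_routing(text: str) -> str:
--     return _route(text.lower(), _ROUTING_SIGNALS, "", -1, 0)
-- ===== Notes on version B (the rewrite author's own statement) =====
-- stated objective: simpler
-- what changed: Replaces the sort-then-filter-then-index pipeline by a recursion over the signal table that tracks the first maximal label via a strict comparison plus a count of labels scoring at least 2; indexing the third sorted hit becomes a threshold on that count and no sort is performed.
import Mathlib
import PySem

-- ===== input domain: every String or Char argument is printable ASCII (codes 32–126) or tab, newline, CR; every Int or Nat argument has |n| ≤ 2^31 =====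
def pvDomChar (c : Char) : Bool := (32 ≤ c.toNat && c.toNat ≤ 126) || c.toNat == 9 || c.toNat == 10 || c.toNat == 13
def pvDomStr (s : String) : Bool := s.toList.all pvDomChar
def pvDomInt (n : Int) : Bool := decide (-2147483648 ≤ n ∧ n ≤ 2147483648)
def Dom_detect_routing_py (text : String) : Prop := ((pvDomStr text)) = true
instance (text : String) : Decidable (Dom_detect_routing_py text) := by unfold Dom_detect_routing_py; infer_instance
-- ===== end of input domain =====

-- B replaces A's sort/filter/index pipeline by a recursion over the signal table tracking the
-- first best label and a count of strong (>=2) labels; objective: simpler.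

-- module constant _ROUTING_SIGNALS (shared by both Pythons)
def routingSignals : List (String × List String) := [
  ("⚖️ Legal Complaints",  ["case no", "ck-", "risk level", "amount at stake", "legal counsel", "litigation", "plaintiff", "settlement amount"]),
  ("📋 Regulatory",        ["permit no", "certificate no", "expiry date", "issuing authority", "fda registration", "zoning permit", "conditional status"]),
  ("🔍 Audit Findings",    ["audit report", "auditor", "pwc", "deloitte", "kpmg", "critical finding", "significant finding", "remediation deadline"]),
  ("💼 Consultancy",       ["consulting firm", "roi estimate", "mckinsey", "phase 1", "phase 2", "strategic recommendation", "projected saving"]),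
  ("🛡️ Inspections",       ["inspection report", "corrective action", "inspector", "food safety score", "inspection grade", "health permit"]),
  ("📊 Revenue Analytics", ["cancellation rate", "avg order value", "orders placed", "total orders", "weekly revenue", "order count"]),
  ("⚙️ Operations",        ["complaint rate", "cancel rate", "food safety grade", "kitchen throughput", "busiest hour", "operational risk"])]

-- ===== PORT A =====
-- A's "sum(1 for s in sigs if s in lower)"
def pvScore (lower : String) (sigs : List String) : Int :=
  ((sigs.filter (fun s => PySem.Str.isIn s lower)).map (fun _ => (1 : Int))).sum

def detect_routing_py (text : String) : String :=
  let lower := PySem.Str.lower text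
  let scored := PySem.List.sorted
    (routingSignals.map (fun ls => (ls.1, pvScore lower ls.2)))
    (fun x => -x.2) false
  let hits := scored.filter (fun x => decide (1 ≤ x.2))
  if hits.isEmpty then ""
  else if 3 ≤ hits.length ∧ 2 ≤ (PySem.List.pyGetD hits 2 ("", 0)).2 then "🏗️ Multi-agent synthesis"
  else (PySem.List.pyGetD hits 0 ("", 0)).1

-- ===== PORT B =====
-- Source B's "_sig_score": len([s for s in needles if s in hay])
def pvSigScore (hay : String) (needles : List String) : Int :=
  ((needles.filter (fun s => PySem.Str.isIn s hay)).length : Int)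

-- Source B's "_route": recursion over the signal table
def pvRoute (hay : String) (signals : List (String × List String))
    (bestLabel : String) (bestScore : Int) (strong : Int) : String :=
  match signals with
  | [] =>
      if bestScore < 1 then ""
      else if 3 ≤ strong then "🏗️ Multi-agent synthesis"
      else bestLabel
  | (label, sigs) :: rest =>
      let sc := pvSigScore hay sigs
      if bestScore < sc then
        pvRoute hay rest label sc (if 2 ≤ sc then strong + 1 else strong)
      else
        pvRoute hay rest bestLabel bestScore (if 2 ≤ sc then strong + 1 else strong)

def detect_routing_py_alt (text : String) : String :=
  pvRoute (PySem.Str.lower text) routingSignals "" (-1) 0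

-- ===== PRECONDITION & SPEC =====
def Spec_detect_routing_py (text : String) (out : String) : Prop := out = detect_routing_py_alt text
instance (text : String) (out : String) : Decidable (Spec_detect_routing_py text out) := by unfold Spec_detect_routing_py; infer_instance

-- ===== CLAIM (what is proved, stated in full; the proofs are below) =====
def Claim_equal_detect_routing_py : Prop := ∀ (text : String), Dom_detect_routing_py text → Spec_detect_routing_py text (detect_routing_py text)

-- ===== LEMMAS AND PROOFS =====

-- abstract both programs over the scored pair list
def pvPairs (text : String) : List (String × Int) :=
  routingSignals.map (fun ls => (ls.1, pvScore (PySem.Str.lower text) ls.2))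

def pvA (ps : List (String × Int)) : String :=
  let scored := PySem.List.sorted ps (fun x => -x.2) false
  let hits := scored.filter (fun x => decide (1 ≤ x.2))
  if hits.isEmpty then ""
  else if 3 ≤ hits.length ∧ 2 ≤ (PySem.List.pyGetD hits 2 ("", 0)).2 then "🏗️ Multi-agent synthesis"
  else (PySem.List.pyGetD hits 0 ("", 0)).1

def pvStep (acc : String × Int × Int) (p : String × Int) : String × Int × Int :=
  let acc := if acc.2.1 < p.2 then (p.1, p.2, acc.2.2) else acc
  if 2 ≤ p.2 then (acc.1, acc.2.1, acc.2.2 + 1) else acc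

def pvFinish (st : String × Int × Int) : String :=
  if st.2.1 < 1 then ""
  else if 3 ≤ st.2.2 then "🏗️ Multi-agent synthesis"
  else st.1

def pvB (ps : List (String × Int)) : String := pvFinish (ps.foldl pvStep ("", -1, 0))

lemma pvSigScore_eq (hay : String) (needles : List String) :
    pvSigScore hay needles = pvScore hay needles := by
  unfold pvSigScore pvScore
  induction (needles.filter (fun s => PySem.Str.isIn s hay)) with
  | nil => simp
  | cons a t ih => simp only [List.length_cons, List.map_cons, List.sum_cons, ← ih]; push_cast; ring

lemma pvRoute_eq_fold (hay : String) (signals : List (String × List String))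
    (b : String) (s k : Int) :
    pvRoute hay signals b s k =
      pvFinish ((signals.map (fun ls => (ls.1, pvScore hay ls.2))).foldl pvStep (b, s, k)) := by
  induction signals generalizing b s k with
  | nil => rfl
  | cons hd tl ih =>
    obtain ⟨label, sigs⟩ := hd
    simp only [pvRoute, List.map_cons, List.foldl_cons, pvSigScore_eq]
    by_cases hlt : s < pvScore hay sigs
    · rw [if_pos hlt, ih]
      congr 1
      simp only [pvStep, if_pos hlt]
      split_ifs <;> rfl
    · rw [if_neg hlt, ih]
      congr 1
      simp only [pvStep, if_neg hlt]
      split_ifs <;> rfl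

lemma pvStep_strong (a : String × Int × Int) (p : String × Int) :
    (pvStep a p).2.2 = if 2 ≤ p.2 then a.2.2 + 1 else a.2.2 := by
  simp only [pvStep]; split_ifs <;> rfl

lemma pvStep_best (a : String × Int × Int) (p : String × Int) :
    ((pvStep a p).1, (pvStep a p).2.1) = if a.2.1 < p.2 then (p.1, p.2) else (a.1, a.2.1) := by
  simp only [pvStep]; split_ifs <;> rfl

lemma fold_strong (ps : List (String × Int)) (a : String × Int × Int) :
    (ps.foldl pvStep a).2.2 = a.2.2 + (ps.countP (fun x => decide (2 ≤ x.2)) : Int) := by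
  induction ps generalizing a with
  | nil => simp
  | cons p t ih =>
    simp only [List.foldl_cons, List.countP_cons, ih, pvStep_strong]
    by_cases h : 2 ≤ p.2 <;> simp [h] <;> push_cast <;> omega

lemma fold_head (ps : List (String × Int)) (hnn : ∀ x ∈ ps, 0 ≤ x.2) (hne : ps ≠ []) :
    (PySem.List.sorted ps (fun x => -x.2) false).head? =
      some ((ps.foldl pvStep ("", -1, 0)).1, (ps.foldl pvStep ("", -1, 0)).2.1) := by
  induction ps using List.reverseRecOn with
  | nil => exact absurd rfl hne
  | append_singleton t x ih =>
    have hx : (0:Int) ≤ x.2 := hnn x (by simp)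
    have hs : PySem.List.sorted (t ++ [x]) (fun y : String × Int => -y.2) false =
        PySem.List.insertBy (fun a b => decide ((-a.2 : Int) < -b.2)) x
          (PySem.List.sorted t (fun y : String × Int => -y.2) false) := by
      rw [PySem.List.sorted_eq_foldl_insertBy, PySem.List.sorted_eq_foldl_insertBy,
        List.foldl_append, List.foldl_cons, List.foldl_nil]
    have hF : (t ++ [x]).foldl pvStep ("", -1, 0) = pvStep (t.foldl pvStep ("", -1, 0)) x := by
      simp [List.foldl_append]
    rcases eq_or_ne t [] with rfl | htne
    · have : PySem.List.sorted ([] ++ [x]) (fun y : String × Int => -y.2) false = [x] := by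
        rw [hs]; rfl
      rw [this, hF]
      have hb := pvStep_best ("", -1, 0) x
      rw [if_pos (by simpa using by omega : ((("", -1, 0) : String × Int × Int)).2.1 < x.2)] at hb
      simp only [List.head?_cons, List.foldl_nil]
      rw [Prod.ext_iff] at hb
      simp only [Option.some.injEq]
      rw [Prod.ext_iff]
      exact ⟨hb.1.symm, hb.2.symm⟩
    · have ih' := ih (fun y hy => hnn y (by simp [hy])) htne
      obtain ⟨m, s, hms⟩ := List.exists_cons_of_ne_nil
        (by rw [ne_eq, PySem.List.sorted_eq_nil_iff]; exact htne :
          PySem.List.sorted t (fun y : String × Int => -y.2) false ≠ [])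
      rw [hms] at ih' hs
      simp only [List.head?_cons, Option.some.injEq] at ih'
      have ihl : m.1 = (t.foldl pvStep ("", -1, 0)).1 := by rw [ih']
      have ihr : m.2 = (t.foldl pvStep ("", -1, 0)).2.1 := by rw [ih']
      have hins : PySem.List.insertBy (fun a b => decide ((-a.2 : Int) < -b.2)) x (m :: s) =
          if decide ((-x.2 : Int) < -m.2) then x :: m :: s
          else m :: PySem.List.insertBy (fun a b => decide ((-a.2 : Int) < -b.2)) x s := by
        rw [PySem.List.insertBy]
      rw [hs, hins, hF]
      have hb := pvStep_best (t.foldl pvStep ("", -1, 0)) x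
      rw [Prod.ext_iff] at hb
      by_cases hcmp : m.2 < x.2
      · have hc : ((-x.2 : Int) < -m.2) = True := by simp; omega
        have hc2 : (t.foldl pvStep ("", -1, 0)).2.1 < x.2 := by rw [← ihr]; exact hcmp
        rw [if_pos hc2] at hb
        simp only [hc, decide_true, if_true] at *
        simp [hb.1, hb.2]
      · have hc2 : ¬ (t.foldl pvStep ("", -1, 0)).2.1 < x.2 := by rw [← ihr]; exact hcmp
        rw [if_neg hc2] at hb
        rw [if_neg (by simp; omega)]
        simp only [List.head?_cons, Option.some.injEq]
        rw [Prod.ext_iff]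
        exact ⟨by rw [ihl]; exact hb.1.symm, by rw [ihr]; exact hb.2.symm⟩

lemma desc_count (h : List (String × Int)) (hp : h.Pairwise (fun a b => b.2 ≤ a.2)) :
    (3 ≤ h.length ∧ 2 ≤ (PySem.List.pyGetD h 2 ("", 0)).2) ↔
      3 ≤ h.countP (fun x => decide (2 ≤ x.2)) := by
  rcases h with _ | ⟨a, _ | ⟨b, _ | ⟨c, t⟩⟩⟩
  · simp
  · have := List.countP_le_length (p := fun x : String × Int => decide (2 ≤ x.2)) (l := [a])
    simp at this ⊢; omega
  · have := List.countP_le_length (p := fun x : String × Int => decide (2 ≤ x.2)) (l := [a, b])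
    simp at this ⊢; omega
  · simp only [List.pairwise_cons] at hp
    obtain ⟨h1, h2, h3, hpt⟩ := hp
    have hab : b.2 ≤ a.2 := h1 b (by simp)
    have hac : c.2 ≤ b.2 := h2 c (by simp)
    have hct : ∀ x ∈ t, x.2 ≤ c.2 := h3
    have hget : PySem.List.pyGetD (a :: b :: c :: t) 2 ("", 0) = c := by
      rw [show (2 : Int) = ((2 : Nat) : Int) by norm_num, PySem.List.pyGetD_natCast]; rfl
    rw [hget]
    simp only [List.countP_cons, List.length_cons]
    constructor
    · rintro ⟨-, hc2⟩
      have : 2 ≤ b.2 := le_trans hc2 hac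
      have : 2 ≤ a.2 := le_trans ‹2 ≤ b.2› hab
      simp [hc2, ‹2 ≤ b.2›, ‹2 ≤ a.2›]
    · intro h3c
      by_cases hc2 : 2 ≤ c.2
      · exact ⟨by omega, hc2⟩
      · exfalso
        have ht0 : t.countP (fun x => decide (2 ≤ x.2)) = 0 :=
          List.countP_eq_zero.mpr (fun x hx => by simp; have := hct x hx; omega)
        rw [ht0] at h3c
        simp only [decide_eq_true_eq] at h3c
        split_ifs at h3c <;> omega

lemma pvA_eq_pvB (ps : List (String × Int)) (hnn : ∀ x ∈ ps, 0 ≤ x.2) : pvA ps = pvB ps := by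
  rcases eq_or_ne ps [] with rfl | hps
  · rfl
  · obtain ⟨m, t, hmt⟩ := List.exists_cons_of_ne_nil
      (by rw [ne_eq, PySem.List.sorted_eq_nil_iff]; exact hps :
        PySem.List.sorted ps (fun y : String × Int => -y.2) false ≠ [])
    have hhead := fold_head ps hnn hps
    rw [hmt] at hhead
    simp only [List.head?_cons, Option.some.injEq] at hhead
    have hmax : ∀ y ∈ ps, y.2 ≤ m.2 := by
      intro y hy
      have := PySem.List.key_head_sorted_le ps (fun y : String × Int => -y.2) hmt y hy
      simp only at this
      omega
    have hm_mem : m ∈ ps :=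
      (PySem.List.sorted_perm ps (fun y : String × Int => -y.2) false).subset
        (by rw [hmt]; exact List.mem_cons_self)
    have hm0 : (0:Int) ≤ m.2 := hnn m hm_mem
    have hpw : (PySem.List.sorted ps (fun y : String × Int => -y.2) false).Pairwise
        (fun a b => b.2 ≤ a.2) :=
      (PySem.List.sorted_pairwise ps (fun y : String × Int => -y.2)).imp (fun h => by omega)
    have hstrong := fold_strong ps ("", -1, 0)
    have hcount : (ps.foldl pvStep ("", -1, 0)).2.2 =
        ((PySem.List.sorted ps (fun y : String × Int => -y.2) false).countP
          (fun x => decide (2 ≤ x.2)) : Int) := by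
      rw [hstrong, ((PySem.List.sorted_perm ps (fun y : String × Int => -y.2) false).countP_eq _)]
      ring
    simp only [pvA, pvB, pvFinish]
    by_cases hb1 : (ps.foldl pvStep ("", -1, 0)).2.1 < 1
    · have hfil : (PySem.List.sorted ps (fun y : String × Int => -y.2) false).filter
          (fun x => decide (1 ≤ x.2)) = [] := by
        rw [List.filter_eq_nil_iff]
        intro y hy
        have hy' : y ∈ ps :=
          (PySem.List.sorted_perm ps (fun y : String × Int => -y.2) false).subset hy
        have h1 := hmax y hy'
        have h2 : m.2 = (ps.foldl pvStep ("", -1, 0)).2.1 := by rw [hhead]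
        simp; omega
      rw [hfil, if_pos hb1]
      rfl
    · have hm2 : m.2 = (ps.foldl pvStep ("", -1, 0)).2.1 := by rw [hhead]
      have hm1 : (1:Int) ≤ m.2 := by omega
      have hfil : (PySem.List.sorted ps (fun y : String × Int => -y.2) false).filter
          (fun x => decide (1 ≤ x.2)) = m :: (t.filter (fun x => decide (1 ≤ x.2))) := by
        rw [hmt, List.filter_cons_of_pos (by simpa using hm1)]
      have hpw' : ((PySem.List.sorted ps (fun y : String × Int => -y.2) false).filter
          (fun x => decide (1 ≤ x.2))).Pairwise (fun a b => b.2 ≤ a.2) := hpw.filter _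
      have hcnt_hits : ((PySem.List.sorted ps (fun y : String × Int => -y.2) false).filter
            (fun x => decide (1 ≤ x.2))).countP (fun x => decide (2 ≤ x.2)) =
          (PySem.List.sorted ps (fun y : String × Int => -y.2) false).countP
            (fun x => decide (2 ≤ x.2)) := by
        rw [List.countP_filter]
        exact List.countP_congr (fun x _ => by
          by_cases h : (2:Int) ≤ x.2 <;> simp [h] <;> omega)
      have hdc := desc_count _ hpw'
      rw [hcnt_hits] at hdc
      have hiff : (3 ≤ ((PySem.List.sorted ps (fun y : String × Int => -y.2) false).filter
            (fun x => decide (1 ≤ x.2))).length ∧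
          2 ≤ (PySem.List.pyGetD ((PySem.List.sorted ps (fun y : String × Int => -y.2) false).filter
            (fun x => decide (1 ≤ x.2))) 2 ("", 0)).2) ↔
          3 ≤ (ps.foldl pvStep ("", -1, 0)).2.2 := by
        rw [hdc, hcount]; exact_mod_cast Iff.rfl
      rw [if_neg hb1]
      rw [if_neg (by rw [hfil]; simp)]
      by_cases hc : 3 ≤ (ps.foldl pvStep ("", -1, 0)).2.2
      · rw [if_pos (hiff.mpr hc), if_pos hc]
      · rw [if_neg (fun h => hc (hiff.mp h)), if_neg hc]
        rw [hfil, PySem.List.pyGetD_zero_cons, hhead]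

lemma pvPairs_nonneg (text : String) : ∀ x ∈ pvPairs text, 0 ≤ x.2 := by
  intro x hx
  simp only [pvPairs, List.mem_map] at hx
  obtain ⟨ls, -, rfl⟩ := hx
  simp only [pvScore]
  induction (ls.2.filter (fun s => PySem.Str.isIn s (PySem.Str.lower text))) with
  | nil => simp
  | cons a t ih => simp only [List.map_cons, List.sum_cons]; omega

-- ===== VERDICT (by name: the statement is the Claim_ definition above) =====
set_option maxHeartbeats 1000000 in
theorem detect_routing_py_spec : Claim_equal_detect_routing_py := by
  intro text _
  show detect_routing_py text = detect_routing_py_alt text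
  have ha : detect_routing_py text = pvA (pvPairs text) := by
    unfold detect_routing_py pvA pvPairs
    rfl
  have hb : detect_routing_py_alt text = pvB (pvPairs text) := by
    unfold detect_routing_py_alt pvB pvPairs
    rw [pvRoute_eq_fold]
  rw [ha, hb, pvA_eq_pvB _ (pvPairs_nonneg text)]
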